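-- pv_equiv track=rewrite | github.com/phlalx/algorithms | leetcode/1034.coloring-a-border.py | colorBorder
-- ===== SOURCE A (Python) =====
-- from typing import List
--
-- def colorBorder(grid: List[List[int]], r0: int, c0: int, color: int) -> List[List[int]]:
--     visited = set()
--     border = []
--
--     component_color = grid[r0][c0]
--     if component_color == 0:
--         return grid
--
--     n = len(grid)
--     p = len(grid[0])
--
--     def neigh(s):
--         i, j = s
--         for di, dj in zip([0,1,0,-1], [1,0,-1,0]):
--             ii = i + di
--             jj = j + dj
--             if 0 <= ii < n and 0 <= jj < p and grid[ii][jj] == component_color: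
--                 yield ii, jj
--
--     def is_border(s):
--         i, j = s
--         for di, dj in zip([0,1,0,-1], [1,0,-1,0]):
--             ii = i + di
--             jj = j + dj
--             if not (0 <= ii < n and 0 <= jj < p):
--                 return True
--             if grid[ii][jj] == 0:
--                 return True
--             if grid[ii][jj] != component_color:
--                 return True
--         return False
--
--     def dfs(s):
--         if is_border(s):
--             border.append(s)
--         for ss in neigh(s):
--             if ss not in visited:
--                 visited.add(ss)
--                 dfs(ss)
--
--     dfs((r0, c0))
--
--     for i, j in border:
--         grid[i][j] = color
--
--     return grid
-- ===== SOURCE B (Python) =====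
-- def colorBorder(grid, r0, c0, color):
--     cc = grid[r0][c0]
--     if cc == 0:
--         return grid
--     n = len(grid)
--     p = len(grid[0])
--
--     def same(i, j):
--         return 0 <= i < n and 0 <= j < p and grid[i][j] == cc
--
--     # grow the component by round-based saturation (no recursion, no stack)
--     comp = {(r0, c0)}
--     while True:
--         new = {(i + di, j + dj)
--                for (i, j) in comp
--                for di, dj in ((0, 1), (1, 0), (0, -1), (-1, 0))
--                if same(i + di, j + dj) and (i + di, j + dj) not in comp}
--         if not new:
--             break
--         comp |= new
--
--     # second pass: the component cells with a non-component neighbor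
--     border = {(i, j) for (i, j) in comp
--               if any(not same(i + di, j + dj)
--                      for di, dj in ((0, 1), (1, 0), (0, -1), (-1, 0)))}
--     for i, j in border:
--         grid[i][j] = color
--     return grid
-- ===== Notes on version B (the rewrite author's own statement) =====
-- stated objective: alternative
-- what changed: A's recursive DFS that interleaves border-collection with the traversal is replaced by an iterative round-based saturation (grow the component by whole frontiers until a fixpoint) followed by a separate border-filter pass over the collected component.
-- outside the precondition, e.g. on colorBorder([[1, 2], [5]], 0, 0, 9): A returns [[9, 2], [5]], B returns [[9, 2], [5]]
import Mathlib
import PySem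

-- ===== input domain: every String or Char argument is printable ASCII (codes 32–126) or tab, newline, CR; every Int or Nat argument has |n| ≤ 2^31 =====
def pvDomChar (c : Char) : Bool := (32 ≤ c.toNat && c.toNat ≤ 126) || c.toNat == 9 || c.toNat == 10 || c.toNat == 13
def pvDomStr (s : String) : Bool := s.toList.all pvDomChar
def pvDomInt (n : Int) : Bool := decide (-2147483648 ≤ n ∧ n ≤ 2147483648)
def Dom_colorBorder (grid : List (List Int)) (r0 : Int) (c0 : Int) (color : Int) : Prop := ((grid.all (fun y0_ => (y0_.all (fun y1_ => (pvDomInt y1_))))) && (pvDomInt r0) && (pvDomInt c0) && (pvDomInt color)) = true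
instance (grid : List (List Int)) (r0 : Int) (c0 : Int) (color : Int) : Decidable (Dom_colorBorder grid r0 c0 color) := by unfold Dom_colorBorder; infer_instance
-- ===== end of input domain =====

-- B replaces A's recursive DFS by an iterative round-based saturation of the component followed by a
-- separate border-filter pass (alternative decomposition, same asymptotic cost on these grids).
-- Both A and B mutate `grid` in place in Python; the equivalence proved here is about the return value.

-- helpers shared by both ports (transliterations of the identical Python expressions)
def pvDirs : List (Int × Int) := [(0,1),(1,0),(0,-1),(-1,0)]

-- grid[i][j] under in-range nonnegative indices (both Pythons only index inside these bounds)
def pvCell (g : List (List Int)) (i j : Int) : Int :=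
  PySem.List.pyGetD (PySem.List.pyGetD g i []) j 0

-- '0 <= i < n and 0 <= j < p and grid[i][j] == component_color'
def pvGood (g : List (List Int)) (cc n p : Int) (s : Int × Int) : Bool :=
  decide (0 ≤ s.1) && decide (s.1 < n) && decide (0 ≤ s.2) && decide (s.2 < p) &&
    (pvCell g s.1 s.2 == cc)

-- 'grid[i][j] = color'
def pvWrite (g : List (List Int)) (s : Int × Int) (v : Int) : List (List Int) :=
  PySem.List.pySetD g s.1 (PySem.List.pySetD (PySem.List.pyGetD g s.1 []) s.2 v)

-- ===== PORT A =====
-- generator 'neigh'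
def pvNeigh (g : List (List Int)) (cc n p : Int) (s : Int × Int) : List (Int × Int) :=
  pvDirs.filterMap (fun d =>
    if pvGood g cc n p (s.1 + d.1, s.2 + d.2) then some (s.1 + d.1, s.2 + d.2) else none)

-- 'is_border' with A's three tests in order
def pvIsBorderA (g : List (List Int)) (cc n p : Int) (s : Int × Int) : Bool :=
  pvDirs.any (fun d =>
    if ¬ (0 ≤ s.1 + d.1 ∧ s.1 + d.1 < n ∧ 0 ≤ s.2 + d.2 ∧ s.2 + d.2 < p) then true
    else if pvCell g (s.1 + d.1) (s.2 + d.2) == 0 then true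
    else pvCell g (s.1 + d.1) (s.2 + d.2) != cc)

-- 'dfs' (fuel only makes the recursion total; it is proved sufficient)
def pvDfsA (g : List (List Int)) (cc n p : Int) :
    Nat → (List (Int × Int) × List (Int × Int)) → (Int × Int) →
    (List (Int × Int) × List (Int × Int))
  | 0, vb, _ => vb
  | Nat.succ f, vb, s =>
    let vb1 := if pvIsBorderA g cc n p s then (vb.1, vb.2 ++ [s]) else vb
    (pvNeigh g cc n p s).foldl
      (fun acc ss =>
        if PySem.Set.contains acc.1 ss then acc
        else pvDfsA g cc n p f (PySem.Set.add acc.1 ss, acc.2) ss) vb1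

def colorBorder (grid : List (List Int)) (r0 : Int) (c0 : Int) (color : Int) : List (List Int) :=
  match PySem.List.pyGet? grid r0 with
  | none => grid
  | some row =>
    match PySem.List.pyGet? row c0 with
    | none => grid
    | some cc =>
      if cc = 0 then grid
      else
        let n : Int := grid.length
        let p : Int := (PySem.List.pyGetD grid 0 []).length
        let r := pvDfsA grid cc n p (grid.length * (PySem.List.pyGetD grid 0 []).length + 1)
                   ([], []) (r0, c0)
        r.2.foldl (fun gacc s => pvWrite gacc s color) grid

-- ===== PORT B =====
-- one saturation round: all same-colored neighbors of comp not yet in comp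
def pvNewList (g : List (List Int)) (cc n p : Int) (comp : List (Int × Int)) : List (Int × Int) :=
  comp.flatMap (fun s => pvDirs.filterMap (fun d =>
    if pvGood g cc n p (s.1 + d.1, s.2 + d.2) && ! PySem.Set.contains comp (s.1 + d.1, s.2 + d.2)
    then some (s.1 + d.1, s.2 + d.2) else none))

-- 'while True: new = {...}; if not new: break; comp |= new' (fuel only makes the loop total)
def pvSaturate (g : List (List Int)) (cc n p : Int) : Nat → List (Int × Int) → List (Int × Int)
  | 0, comp => comp
  | Nat.succ f, comp =>
    let new := PySem.Set.ofList (pvNewList g cc n p comp)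
    if new.isEmpty then comp else pvSaturate g cc n p f (PySem.Set.union comp new)

-- 'any(not same(...) for ...)'
def pvIsBorderB (g : List (List Int)) (cc n p : Int) (s : Int × Int) : Bool :=
  pvDirs.any (fun d => ! pvGood g cc n p (s.1 + d.1, s.2 + d.2))

def colorBorder_alt (grid : List (List Int)) (r0 : Int) (c0 : Int) (color : Int) : List (List Int) :=
  match (PySem.List.pyGet? grid r0).bind (fun row => PySem.List.pyGet? row c0) with
  | none => grid
  | some cc =>
    if cc = 0 then grid
    else
      let n : Int := grid.length
      let p : Int := (PySem.List.pyGetD grid 0 []).length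
      let comp := pvSaturate grid cc n p (grid.length * (PySem.List.pyGetD grid 0 []).length + 1)
                    [(r0, c0)]
      let border := comp.filter (fun s => pvIsBorderB grid cc n p s)
      border.foldl (fun gacc s => pvWrite gacc s color) grid

-- ===== PRECONDITION & SPEC =====
-- Python's effective index: i, or len+i for a negative in-range i
def pvNorm (len : Nat) (i : Int) : Nat := if i < 0 then len - (-i).toNat else i.toNat

-- Pre_ excludes inputs that can raise IndexError (a start index outside Python's wrap range, and
-- grids whose later rows are shorter than row 0, where the flood fill may index a missing cell);
-- on excluded ragged grids that A's search happens not to reach, A returns and B agrees with it.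
def Pre_colorBorder (grid : List (List Int)) (r0 : Int) (c0 : Int) (color : Int) : Prop :=
  -(grid.length : Int) ≤ r0 ∧ r0 < (grid.length : Int) ∧
  (∀ row ∈ grid, (grid.headD []).length ≤ row.length) ∧
  -(((grid.getD (pvNorm grid.length r0) []).length : Int)) ≤ c0 ∧
  c0 < ((grid.getD (pvNorm grid.length r0) []).length : Int)
instance (grid : List (List Int)) (r0 : Int) (c0 : Int) (color : Int) : Decidable (Pre_colorBorder grid r0 c0 color) := by unfold Pre_colorBorder; infer_instance

def pvWitness_colorBorder : List (List Int) × Int × Int × Int := ([[1, 1], [1, 0]], 0, 0, 2)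

def Spec_colorBorder (grid : List (List Int)) (r0 : Int) (c0 : Int) (color : Int) (out : List (List Int)) : Prop := out = colorBorder_alt grid r0 c0 color
instance (grid : List (List Int)) (r0 : Int) (c0 : Int) (color : Int) (out : List (List Int)) : Decidable (Spec_colorBorder grid r0 c0 color out) := by unfold Spec_colorBorder; infer_instance

-- ===== CLAIM (what is proved, stated in full; the proofs are below) =====
def Claim_equal_colorBorder : Prop := ∀ (grid : List (List Int)) (r0 : Int) (c0 : Int) (color : Int), Dom_colorBorder grid r0 c0 color → Pre_colorBorder grid r0 c0 color → Spec_colorBorder grid r0 c0 color (colorBorder grid r0 c0 color)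

-- ===== LEMMAS AND PROOFS =====

-- reachability through same-colored in-bounds neighbors
inductive pvReach (g : List (List Int)) (cc n p : Int) (a : Int × Int) : Int × Int → Prop
  | refl : pvReach g cc n p a a
  | step {s t : Int × Int} : pvReach g cc n p a s → t ∈ pvNeigh g cc n p s → pvReach g cc n p a t

lemma pvReach_trans (g : List (List Int)) (cc n p : Int) (a s x : Int × Int)
    (h1 : pvReach g cc n p a s) (h2 : pvReach g cc n p s x) : pvReach g cc n p a x := by
  induction h2 with
  | refl => exact h1
  | step _ hmem ih => exact pvReach.step ih hmem

lemma pvReach_min (g : List (List Int)) (cc n p : Int) (a : Int × Int) (P : Int × Int → Prop)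
    (ha : P a) (hcl : ∀ s t, P s → t ∈ pvNeigh g cc n p s → P t) :
    ∀ x, pvReach g cc n p a x → P x := by
  intro x hx
  induction hx with
  | refl => exact ha
  | step _ hmem ih => exact hcl _ _ ih hmem

lemma pvNeigh_good (g : List (List Int)) (cc n p : Int) (s t : Int × Int)
    (h : t ∈ pvNeigh g cc n p s) : pvGood g cc n p t = true := by
  simp only [pvNeigh, List.mem_filterMap] at h
  obtain ⟨d, _, hd⟩ := h
  by_cases hg : pvGood g cc n p (s.1 + d.1, s.2 + d.2) = true
  · simp [hg] at hd; simpa [← hd] using hg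
  · simp [hg] at hd

-- all good cells, listed
def pvGoodList (g : List (List Int)) (cc n p : Int) : List (Int × Int) :=
  (List.range n.toNat).flatMap (fun i : Nat => (List.range p.toNat).filterMap (fun j : Nat =>
    if pvGood g cc n p ((i : Int), (j : Int)) then some ((i : Int), (j : Int)) else none))

lemma mem_pvGoodList (g : List (List Int)) (cc n p : Int) (s : Int × Int)
    (h : pvGood g cc n p s = true) : s ∈ pvGoodList g cc n p := by
  have h' := h
  unfold pvGood at h'
  simp only [Bool.and_eq_true, decide_eq_true_eq, beq_iff_eq] at h'
  obtain ⟨⟨⟨⟨h1, h2⟩, h3⟩, h4⟩, h5⟩ := h'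
  have hi : s.1.toNat ∈ List.range n.toNat := List.mem_range.mpr (by omega)
  have hj : s.2.toNat ∈ List.range p.toNat := List.mem_range.mpr (by omega)
  have e1 : ((s.1.toNat : Int), (s.2.toNat : Int)) = s := by
    obtain ⟨a, b⟩ := s; simp only [Prod.mk.injEq]; constructor <;> simp at * <;> omega
  refine List.mem_flatMap.mpr ⟨s.1.toNat, hi, ?_⟩
  refine List.mem_filterMap.mpr ⟨s.2.toNat, hj, ?_⟩
  rw [e1, if_pos h]


lemma pvGoodList_length (g : List (List Int)) (cc n p : Int) :
    (pvGoodList g cc n p).length ≤ n.toNat * p.toNat := by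
  unfold pvGoodList
  rw [List.length_flatMap]
  refine le_trans (List.sum_le_card_nsmul _ p.toNat ?_) ?_
  · intro x hx
    simp only [List.mem_map] at hx
    obtain ⟨k, _, hk⟩ := hx
    subst hk
    exact le_trans (List.length_filterMap_le _ _) (le_of_eq List.length_range)
  · simp [smul_eq_mul]


lemma nodup_subset_length {α : Type} [DecidableEq α] {l1 l2 : List α}
    (h1 : l1.Nodup) (h : l1 ⊆ l2) : l1.length ≤ l2.length := by
  calc l1.length = l1.toFinset.card := (List.toFinset_card_of_nodup h1).symm
    _ ≤ l2.toFinset.card := Finset.card_le_card (fun x hx => by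
        simp only [List.mem_toFinset] at *; exact h hx)
    _ ≤ l2.length := l2.toFinset_card_le


-- the two border predicates agree when the component color is nonzero
lemma border_pred_eq (g : List (List Int)) (cc n p : Int) (hcc : cc ≠ 0) (s : Int × Int) :
    pvIsBorderA g cc n p s = pvIsBorderB g cc n p s := by
  unfold pvIsBorderA pvIsBorderB
  apply congrArg (List.any pvDirs)
  funext d
  by_cases hb : (0 ≤ s.1 + d.1 ∧ s.1 + d.1 < n ∧ 0 ≤ s.2 + d.2 ∧ s.2 + d.2 < p)
  · have hbb : pvGood g cc n p (s.1 + d.1, s.2 + d.2) = (pvCell g (s.1 + d.1) (s.2 + d.2) == cc) := by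
      simp [pvGood, hb.1, hb.2.1, hb.2.2.1, hb.2.2.2]
    by_cases hc : pvCell g (s.1 + d.1) (s.2 + d.2) = cc
    · simp [hb, hbb, hc, hcc]
    · by_cases h0 : pvCell g (s.1 + d.1) (s.2 + d.2) = 0 <;> simp [hb, hbb, h0, bne, Ne.symm hcc]
  · rw [if_pos hb]
    cases hgood : pvGood g cc n p (s.1 + d.1, s.2 + d.2) with
    | false => simp
    | true =>
      exfalso; apply hb
      simp [pvGood] at hgood
      exact ⟨hgood.1.1.1.1, hgood.1.1.1.2, hgood.1.1.2, hgood.1.2⟩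


lemma length_add_of_not_mem (s : List (Int × Int)) (x : Int × Int) (h : x ∉ s) :
    (PySem.Set.add s x).length = s.length + 1 := by
  have hc : PySem.Set.contains s x = false := by
    cases hc : PySem.Set.contains s x with
    | false => rfl
    | true => exact absurd ((PySem.Set.contains_iff s x).mp hc) h
  simp [PySem.Set.add, h]

-- main DFS lemma (port A)
lemma pvDfsA_main (g : List (List Int)) (cc n p : Int) :
    ∀ (fuel : Nat) (v b : List (Int × Int)) (s : Int × Int),
    v.Nodup → (∀ x ∈ v, pvGood g cc n p x = true) →
    (pvGoodList g cc n p).length + 1 ≤ fuel + v.length →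
    (pvDfsA g cc n p fuel (v, b) s).1.Nodup ∧
    (∀ x ∈ v, x ∈ (pvDfsA g cc n p fuel (v, b) s).1) ∧
    (∀ x ∈ (pvDfsA g cc n p fuel (v, b) s).1, pvGood g cc n p x = true) ∧
    (∀ t ∈ pvNeigh g cc n p s, t ∈ (pvDfsA g cc n p fuel (v, b) s).1) ∧
    (∀ x ∈ (pvDfsA g cc n p fuel (v, b) s).1, x ∉ v →
      ∀ t ∈ pvNeigh g cc n p x, t ∈ (pvDfsA g cc n p fuel (v, b) s).1) ∧
    (∀ x ∈ (pvDfsA g cc n p fuel (v, b) s).1, x ∉ v → pvReach g cc n p s x) ∧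
    (∀ x, x ∈ (pvDfsA g cc n p fuel (v, b) s).2 ↔
      (x ∈ b ∨ (pvIsBorderA g cc n p x = true ∧
        (x = s ∨ (x ∈ (pvDfsA g cc n p fuel (v, b) s).1 ∧ x ∉ v))))) := by
  intro fuel
  induction fuel with
  | zero =>
    intro v b s hnd hgood hfuel
    exfalso
    have hsub : v ⊆ pvGoodList g cc n p := fun x hx => mem_pvGoodList g cc n p x (hgood x hx)
    have := nodup_subset_length hnd hsub
    omega
  | succ f ih =>
    intro v b s hnd hgood hfuel
    have hfold : ∀ (L : List (Int × Int)), (∀ t ∈ L, pvGood g cc n p t = true) →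
        ∀ (acc : List (Int × Int) × List (Int × Int)),
        acc.1.Nodup → (∀ x ∈ acc.1, pvGood g cc n p x = true) →
        (pvGoodList g cc n p).length + 1 ≤ (f + 1) + acc.1.length →
        (L.foldl (fun acc ss => if PySem.Set.contains acc.1 ss then acc
            else pvDfsA g cc n p f (PySem.Set.add acc.1 ss, acc.2) ss) acc).1.Nodup ∧
        (∀ x ∈ acc.1, x ∈ (L.foldl (fun acc ss => if PySem.Set.contains acc.1 ss then acc
            else pvDfsA g cc n p f (PySem.Set.add acc.1 ss, acc.2) ss) acc).1) ∧
        (∀ x ∈ (L.foldl (fun acc ss => if PySem.Set.contains acc.1 ss then acc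
            else pvDfsA g cc n p f (PySem.Set.add acc.1 ss, acc.2) ss) acc).1,
          pvGood g cc n p x = true) ∧
        (∀ t ∈ L, t ∈ (L.foldl (fun acc ss => if PySem.Set.contains acc.1 ss then acc
            else pvDfsA g cc n p f (PySem.Set.add acc.1 ss, acc.2) ss) acc).1) ∧
        (∀ x ∈ (L.foldl (fun acc ss => if PySem.Set.contains acc.1 ss then acc
            else pvDfsA g cc n p f (PySem.Set.add acc.1 ss, acc.2) ss) acc).1, x ∉ acc.1 →
          ∀ t ∈ pvNeigh g cc n p x,
            t ∈ (L.foldl (fun acc ss => if PySem.Set.contains acc.1 ss then acc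
              else pvDfsA g cc n p f (PySem.Set.add acc.1 ss, acc.2) ss) acc).1) ∧
        (∀ x ∈ (L.foldl (fun acc ss => if PySem.Set.contains acc.1 ss then acc
            else pvDfsA g cc n p f (PySem.Set.add acc.1 ss, acc.2) ss) acc).1, x ∉ acc.1 →
          ∃ u ∈ L, pvReach g cc n p u x) ∧
        (∀ x, x ∈ (L.foldl (fun acc ss => if PySem.Set.contains acc.1 ss then acc
            else pvDfsA g cc n p f (PySem.Set.add acc.1 ss, acc.2) ss) acc).2 ↔
          (x ∈ acc.2 ∨ (pvIsBorderA g cc n p x = true ∧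
            (x ∈ (L.foldl (fun acc ss => if PySem.Set.contains acc.1 ss then acc
              else pvDfsA g cc n p f (PySem.Set.add acc.1 ss, acc.2) ss) acc).1 ∧
              x ∉ acc.1)))) := by
      intro L
      induction L with
      | nil =>
        intro _ acc hand hagood _
        simp only [List.foldl_nil]
        refine ⟨hand, fun x hx => hx, hagood, fun t ht => absurd ht List.not_mem_nil, ?_, ?_, ?_⟩
        · intro x hx hnx; exact absurd hx hnx
        · intro x hx hnx; exact absurd hx hnx
        · intro x
          constructor
          · intro hx; exact Or.inl hx
          · rintro (hx | ⟨_, _, hnx⟩)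
            · exact hx
            · exact absurd (by assumption) hnx
      | cons t L ihL =>
        intro hLgood acc hand hagood hafuel
        have htg : pvGood g cc n p t = true := hLgood t List.mem_cons_self
        have hLg : ∀ u ∈ L, pvGood g cc n p u = true :=
          fun u hu => hLgood u (List.mem_cons_of_mem t hu)
        simp only [List.foldl_cons]
        by_cases hc : PySem.Set.contains acc.1 t = true
        · rw [if_pos hc]
          have htacc : t ∈ acc.1 := (PySem.Set.contains_iff acc.1 t).mp hc
          obtain ⟨c1, c2, c3, c4, c5, c6, c7⟩ := ihL hLg acc hand hagood hafuel
          refine ⟨c1, c2, c3, ?_, c5, ?_, c7⟩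
          · intro u hu
            rcases List.mem_cons.mp hu with rfl | hu
            · exact c2 u htacc
            · exact c4 u hu
          · intro x hx hnx
            obtain ⟨u, hu, hr⟩ := c6 x hx hnx
            exact ⟨u, List.mem_cons_of_mem t hu, hr⟩
        · rw [if_neg hc]
          have htacc : t ∉ acc.1 := fun hm => hc ((PySem.Set.contains_iff acc.1 t).mpr hm)
          have hlen : (PySem.Set.add acc.1 t).length = acc.1.length + 1 :=
            length_add_of_not_mem acc.1 t htacc
          have hmemadd : ∀ x, x ∈ PySem.Set.add acc.1 t ↔ x ∈ acc.1 ∨ x = t :=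
            fun x => PySem.Set.mem_add acc.1 t x
          obtain ⟨d1, d2, d3, d4, d5, d6, d7⟩ := ih (PySem.Set.add acc.1 t) acc.2 t
            (PySem.Set.nodup_add acc.1 t hand)
            (fun x hx => ((hmemadd x).mp hx).elim (hagood x) (fun he => he ▸ htg))
            (by omega)
          set r1 := pvDfsA g cc n p f (PySem.Set.add acc.1 t, acc.2) t with hr1
          have haccr1 : ∀ x ∈ acc.1, x ∈ r1.1 :=
            fun x hx => d2 x ((hmemadd x).mpr (Or.inl hx))
          have htr1 : t ∈ r1.1 := d2 t ((hmemadd t).mpr (Or.inr rfl))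
          have hlenr1 : acc.1.length + 1 ≤ r1.1.length := by
            have h1 : (PySem.Set.add acc.1 t) ⊆ r1.1 := fun x hx => d2 x hx
            have := nodup_subset_length (PySem.Set.nodup_add acc.1 t hand) h1
            omega
          obtain ⟨c1, c2, c3, c4, c5, c6, c7⟩ := ihL hLg r1 d1 d3 (by omega)
          refine ⟨c1, fun x hx => c2 x (haccr1 x hx), c3, ?_, ?_, ?_, ?_⟩
          · -- every member of t :: L ends up visited
            intro u hu
            rcases List.mem_cons.mp hu with rfl | hu
            · exact c2 u htr1
            · exact c4 u hu
          · -- closure for the newly visited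
            intro x hx hnx u hu
            by_cases hx1 : x ∈ r1.1
            · by_cases hxt : x = t
              · subst hxt
                exact c2 u (d4 u hu)
              · have : x ∉ PySem.Set.add acc.1 t := by
                  intro hm; rcases (hmemadd x).mp hm with hm | hm
                  · exact hnx hm
                  · exact hxt hm
                exact c2 u (d5 x hx1 this u hu)
            · exact c5 x hx hx1 u hu
          · -- reachability of the newly visited
            intro x hx hnx
            by_cases hx1 : x ∈ r1.1
            · by_cases hxt : x = t
              · exact ⟨t, List.mem_cons_self, hxt ▸ pvReach.refl⟩
              · have : x ∉ PySem.Set.add acc.1 t := by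
                  intro hm; rcases (hmemadd x).mp hm with hm | hm
                  · exact hnx hm
                  · exact hxt hm
                exact ⟨t, List.mem_cons_self, d6 x hx1 this⟩
            · obtain ⟨u, hu, hr⟩ := c6 x hx hx1
              exact ⟨u, List.mem_cons_of_mem t hu, hr⟩
          · -- the border list
            intro x
            rw [c7 x, d7 x]
            constructor
            · rintro ((hx | ⟨hbx, (rfl | ⟨hx1, hxa⟩)⟩) | ⟨hbx, hx, hx1⟩)
              · exact Or.inl hx
              · exact Or.inr ⟨hbx, c2 x htr1, htacc⟩
              · refine Or.inr ⟨hbx, c2 x hx1, ?_⟩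
                intro hm; exact hxa ((hmemadd x).mpr (Or.inl hm))
              · refine Or.inr ⟨hbx, hx, ?_⟩
                intro hm; exact hx1 (haccr1 x hm)
            · rintro (hx | ⟨hbx, hx, hnx⟩)
              · exact Or.inl (Or.inl hx)
              · by_cases hx1 : x ∈ r1.1
                · by_cases hxt : x = t
                  · exact Or.inl (Or.inr ⟨hbx, Or.inl hxt⟩)
                  · refine Or.inl (Or.inr ⟨hbx, Or.inr ⟨hx1, ?_⟩⟩)
                    intro hm; rcases (hmemadd x).mp hm with hm | hm
                    · exact hnx hm
                    · exact hxt hm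
                · exact Or.inr ⟨hbx, hx, hx1⟩
    -- now apply the fold lemma to the body of pvDfsA at succ fuel
    have hneighgood : ∀ t ∈ pvNeigh g cc n p s, pvGood g cc n p t = true :=
      fun t ht => pvNeigh_good g cc n p s t ht
    have hbody : pvDfsA g cc n p (Nat.succ f) (v, b) s =
        (pvNeigh g cc n p s).foldl
          (fun acc ss => if PySem.Set.contains acc.1 ss then acc
            else pvDfsA g cc n p f (PySem.Set.add acc.1 ss, acc.2) ss)
          (if pvIsBorderA g cc n p s then (v, b ++ [s]) else (v, b)) := by
      rw [pvDfsA]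
    by_cases hbs : pvIsBorderA g cc n p s = true
    · rw [hbody, if_pos hbs]
      obtain ⟨c1, c2, c3, c4, c5, c6, c7⟩ := hfold (pvNeigh g cc n p s) hneighgood
        (v, b ++ [s]) hnd hgood (by omega)
      refine ⟨c1, c2, c3, c4, c5, ?_, ?_⟩
      · intro x hx hnx
        obtain ⟨u, hu, hr⟩ := c6 x hx hnx
        exact pvReach_trans g cc n p s u x (pvReach.step pvReach.refl hu) hr
      · intro x
        rw [c7 x]
        simp only [List.mem_append, List.mem_singleton]
        constructor
        · rintro ((hx | rfl) | ⟨hbx, hx, hnx⟩)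
          · exact Or.inl hx
          · exact Or.inr ⟨hbs, Or.inl rfl⟩
          · exact Or.inr ⟨hbx, Or.inr ⟨hx, hnx⟩⟩
        · rintro (hx | ⟨hbx, (rfl | ⟨hx, hnx⟩)⟩)
          · exact Or.inl (Or.inl hx)
          · exact Or.inl (Or.inr rfl)
          · exact Or.inr ⟨hbx, hx, hnx⟩
    · rw [hbody, if_neg hbs]
      obtain ⟨c1, c2, c3, c4, c5, c6, c7⟩ := hfold (pvNeigh g cc n p s) hneighgood
        (v, b) hnd hgood (by omega)
      refine ⟨c1, c2, c3, c4, c5, ?_, ?_⟩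
      · intro x hx hnx
        obtain ⟨u, hu, hr⟩ := c6 x hx hnx
        exact pvReach_trans g cc n p s u x (pvReach.step pvReach.refl hu) hr
      · intro x
        rw [c7 x]
        constructor
        · rintro (hx | ⟨hbx, hx, hnx⟩)
          · exact Or.inl hx
          · exact Or.inr ⟨hbx, Or.inr ⟨hx, hnx⟩⟩
        · rintro (hx | ⟨hbx, (rfl | ⟨hx, hnx⟩)⟩)
          · exact Or.inl hx
          · exact absurd hbx hbs
          · exact Or.inr ⟨hbx, hx, hnx⟩

-- membership helpers
lemma mem_filterMap_if {f : (Int × Int) → (Int × Int)} {P : (Int × Int) → Bool}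
    {L : List (Int × Int)} {t : Int × Int} :
    t ∈ L.filterMap (fun d => if P (f d) then some (f d) else none) ↔
      ∃ d ∈ L, t = f d ∧ P t = true := by
  simp only [List.mem_filterMap]
  constructor
  · rintro ⟨d, hd, hif⟩
    by_cases hp : P (f d) = true
    · rw [if_pos hp] at hif
      obtain rfl : f d = t := Option.some.inj hif
      exact ⟨d, hd, rfl, hp⟩
    · simp [hp] at hif
  · rintro ⟨d, hd, rfl, hp⟩
    exact ⟨d, hd, by rw [if_pos hp]⟩

lemma mem_pvNeigh (g : List (List Int)) (cc n p : Int) (s t : Int × Int) :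
    t ∈ pvNeigh g cc n p s ↔
      ∃ d ∈ pvDirs, t = (s.1 + d.1, s.2 + d.2) ∧ pvGood g cc n p t = true := by
  unfold pvNeigh
  exact mem_filterMap_if

lemma mem_pvNewList (g : List (List Int)) (cc n p : Int) (comp : List (Int × Int))
    (t : Int × Int) :
    t ∈ pvNewList g cc n p comp ↔
      ∃ s ∈ comp, t ∈ pvNeigh g cc n p s ∧ t ∉ comp := by
  unfold pvNewList
  simp only [List.mem_flatMap]
  constructor
  · rintro ⟨s, hs, ht⟩
    have ht' := (mem_filterMap_if (f := fun d => (s.1 + d.1, s.2 + d.2))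
      (P := fun u => pvGood g cc n p u && ! PySem.Set.contains comp u)
      (L := pvDirs) (t := t)).mp ht
    obtain ⟨d, hd, rfl, hp⟩ := ht'
    simp only [Bool.and_eq_true, Bool.not_eq_true'] at hp
    refine ⟨s, hs, ?_, ?_⟩
    · rw [mem_pvNeigh]; exact ⟨d, hd, rfl, hp.1⟩
    · intro hmem
      have := (PySem.Set.contains_iff comp _).mpr hmem
      rw [hp.2] at this; exact Bool.false_ne_true this
  · rintro ⟨s, hs, ht, hnm⟩
    rw [mem_pvNeigh] at ht
    obtain ⟨d, hd, rfl, hg⟩ := ht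
    refine ⟨s, hs, ?_⟩
    apply (mem_filterMap_if (f := fun d => (s.1 + d.1, s.2 + d.2))
      (P := fun u => pvGood g cc n p u && ! PySem.Set.contains comp u)
      (L := pvDirs) (t := (s.1 + d.1, s.2 + d.2))).mpr
    refine ⟨d, hd, rfl, ?_⟩
    simp only [Bool.and_eq_true, Bool.not_eq_true']
    refine ⟨hg, ?_⟩
    cases hc : PySem.Set.contains comp (s.1 + d.1, s.2 + d.2) with
    | false => rfl
    | true => exact absurd ((PySem.Set.contains_iff comp _).mp hc) hnm

lemma union_length_lt (comp new : List (Int × Int)) (hnd : comp.Nodup)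
    (hne : new ≠ []) (hdisj : ∀ x ∈ new, x ∉ comp) :
    comp.length + 1 ≤ (PySem.Set.union comp new).length := by
  obtain ⟨w, hw⟩ := List.exists_mem_of_ne_nil new hne
  have hsub : comp ++ [w] ⊆ PySem.Set.union comp new := by
    intro x hx
    rcases List.mem_append.mp hx with h | h
    · exact (PySem.Set.mem_union comp new x).mpr (Or.inl h)
    · obtain rfl : x = w := List.mem_singleton.mp h
      exact (PySem.Set.mem_union comp new x).mpr (Or.inr hw)
  have hnd2 : (comp ++ [w]).Nodup := by
    rw [List.nodup_append]
    refine ⟨hnd, List.nodup_singleton w, ?_⟩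
    intro x hx y hy heq
    have hyw : y = w := List.mem_singleton.mp hy
    exact hdisj w hw (by rw [← hyw, ← heq]; exact hx)
  have := nodup_subset_length hnd2 hsub
  simpa using this

-- main saturation lemma (port B)
lemma pvSaturate_main (g : List (List Int)) (cc n p : Int) (a : Int × Int) :
    ∀ (fuel : Nat) (comp : List (Int × Int)),
    comp.Nodup → a ∈ comp → (∀ x ∈ comp, x = a ∨ pvGood g cc n p x = true) →
    (∀ x ∈ comp, pvReach g cc n p a x) →
    (pvGoodList g cc n p).length + 2 ≤ fuel + comp.length →
    (∀ x ∈ comp, x ∈ pvSaturate g cc n p fuel comp) ∧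
    (∀ x ∈ pvSaturate g cc n p fuel comp, pvReach g cc n p a x) ∧
    (∀ s ∈ pvSaturate g cc n p fuel comp, ∀ t ∈ pvNeigh g cc n p s,
      t ∈ pvSaturate g cc n p fuel comp) := by
  intro fuel
  induction fuel with
  | zero =>
    intro comp hnd _ hgood _ hfuel
    exfalso
    have hsub : comp ⊆ a :: pvGoodList g cc n p := by
      intro x hx
      rcases hgood x hx with rfl | hgx
      · exact List.mem_cons_self
      · exact List.mem_cons_of_mem a (mem_pvGoodList g cc n p x hgx)
    have := nodup_subset_length hnd hsub
    simp only [List.length_cons] at this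
    omega
  | succ f ih =>
    intro comp hnd ha hgood hreach hfuel
    show _ ∧ _ ∧ _
    rw [pvSaturate]
    set new := PySem.Set.ofList (pvNewList g cc n p comp) with hnew
    by_cases hemp : new.isEmpty
    · rw [if_pos hemp]
      refine ⟨fun x hx => hx, hreach, ?_⟩
      intro s hs t ht
      by_cases htc : t ∈ comp
      · exact htc
      · exfalso
        have : t ∈ new := by
          rw [hnew, PySem.Set.mem_ofList, mem_pvNewList]
          exact ⟨s, hs, ht, htc⟩
        rw [List.isEmpty_iff.mp hemp] at this
        exact List.not_mem_nil this
    · rw [if_neg hemp]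
      have hdisj : ∀ x ∈ new, x ∉ comp := by
        intro x hx
        rw [hnew, PySem.Set.mem_ofList, mem_pvNewList] at hx
        exact hx.choose_spec.2.2
      have hnewgood : ∀ x ∈ new, x = a ∨ pvGood g cc n p x = true := by
        intro x hx
        rw [hnew, PySem.Set.mem_ofList, mem_pvNewList] at hx
        obtain ⟨s, _, ht, _⟩ := hx
        exact Or.inr (pvNeigh_good g cc n p s x ht)
      have hnewreach : ∀ x ∈ new, pvReach g cc n p a x := by
        intro x hx
        rw [hnew, PySem.Set.mem_ofList, mem_pvNewList] at hx
        obtain ⟨s, hs, ht, _⟩ := hx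
        exact pvReach.step (hreach s hs) ht
      have hmemu : ∀ x, x ∈ PySem.Set.union comp new ↔ x ∈ comp ∨ x ∈ new :=
        fun x => PySem.Set.mem_union comp new x
      have hlen := union_length_lt comp new hnd (fun h => hemp (by simp [h])) hdisj
      have h1 := ih (PySem.Set.union comp new)
        (PySem.Set.nodup_union comp new hnd)
        ((hmemu a).mpr (Or.inl ha))
        (fun x hx => (hmemu x).mp hx |>.elim (hgood x) (hnewgood x))
        (fun x hx => (hmemu x).mp hx |>.elim (hreach x) (hnewreach x))
        (by omega)
      exact ⟨fun x hx => h1.1 x ((hmemu x).mpr (Or.inl hx)), h1.2.1, h1.2.2⟩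

-- writes depend only on the SET of written cells (Python indexing, negative wrap included)
lemma pvNorm_lt (len : Nat) (i : Int) (h1 : -(len : Int) ≤ i) (h2 : i < (len : Int)) :
    pvNorm len i < len := by
  unfold pvNorm; split <;> omega

lemma pyIdx?_eq_norm (len : Nat) (i : Int) (h1 : -(len : Int) ≤ i) (h2 : i < (len : Int)) :
    PySem.List.pyIdx? len i = some (pvNorm len i) := by
  unfold PySem.List.pyIdx? pvNorm
  by_cases h0 : 0 ≤ i
  · rw [if_pos h0, if_pos h2, if_neg (by omega)]
  · rw [if_neg h0, if_pos h1, if_pos (by omega)]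

lemma pyGet?_eq_norm {α : Type} (xs : List α) (i : Int)
    (h1 : -(xs.length : Int) ≤ i) (h2 : i < (xs.length : Int)) :
    PySem.List.pyGet? xs i = some (xs[pvNorm xs.length i]'(pvNorm_lt _ _ h1 h2)) := by
  unfold PySem.List.pyGet?
  rw [pyIdx?_eq_norm _ _ h1 h2]
  simp [List.getElem?_eq_getElem (pvNorm_lt _ _ h1 h2)]

lemma pyGetD_eq_norm {α : Type} (xs : List α) (i : Int) (d : α)
    (h1 : -(xs.length : Int) ≤ i) (h2 : i < (xs.length : Int)) :
    PySem.List.pyGetD xs i d = xs[pvNorm xs.length i]'(pvNorm_lt _ _ h1 h2) := by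
  unfold PySem.List.pyGetD
  rw [pyGet?_eq_norm _ _ h1 h2]
  rfl

lemma pySetD_eq_norm {α : Type} (xs : List α) (i : Int) (v : α)
    (h1 : -(xs.length : Int) ≤ i) (h2 : i < (xs.length : Int)) :
    PySem.List.pySetD xs i v = xs.set (pvNorm xs.length i) v := by
  unfold PySem.List.pySetD PySem.List.pySet?
  rw [pyIdx?_eq_norm _ _ h1 h2]
  rfl

def pvNR (g : List (List Int)) (s : Int × Int) : Nat := pvNorm g.length s.1
def pvRowlen (g : List (List Int)) (s : Int × Int) : Nat := (g.getD (pvNR g s) []).length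
def pvNC (g : List (List Int)) (s : Int × Int) : Nat := pvNorm (pvRowlen g s) s.2
def pvCellN (g : List (List Int)) (i j : Nat) : Int := (g.getD i []).getD j 0
def pvInB (g : List (List Int)) (s : Int × Int) : Prop :=
  -(g.length : Int) ≤ s.1 ∧ s.1 < (g.length : Int) ∧
    -(pvRowlen g s : Int) ≤ s.2 ∧ s.2 < (pvRowlen g s : Int)

lemma pvWrite_eq_set (g : List (List Int)) (s : Int × Int) (v : Int) (h : pvInB g s) :
    pvWrite g s v = g.set (pvNR g s) ((g.getD (pvNR g s) []).set (pvNC g s) v) := by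
  obtain ⟨h1, h2, h3, h4⟩ := h
  unfold pvWrite
  have hrow : PySem.List.pyGetD g s.1 [] = g.getD (pvNR g s) [] := by
    rw [pyGetD_eq_norm g s.1 [] h1 h2]
    exact (List.getD_eq_getElem g [] (pvNorm_lt _ _ h1 h2)).symm
  rw [hrow, pySetD_eq_norm _ s.2 v h3 h4, pySetD_eq_norm g s.1 _ h1 h2]
  rfl

lemma pvWrite_length (g : List (List Int)) (s : Int × Int) (v : Int) (h : pvInB g s) :
    (pvWrite g s v).length = g.length := by
  rw [pvWrite_eq_set g s v h]; simp

lemma pvWrite_row_length (g : List (List Int)) (s : Int × Int) (v : Int) (h : pvInB g s) (k : Nat) :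
    ((pvWrite g s v).getD k []).length = (g.getD k []).length := by
  rw [pvWrite_eq_set g s v h]
  by_cases hk : k < g.length
  · rw [List.getD_eq_getElem _ _ (by simpa using hk), List.getD_eq_getElem g [] hk,
        List.getElem_set]
    by_cases he : pvNR g s = k
    · subst he
      simp [List.getElem?_eq_getElem hk]
    · simp [he]
  · rw [List.getD_eq_default _ _ (by simpa using Nat.le_of_not_lt hk),
        List.getD_eq_default _ _ (Nat.le_of_not_lt hk)]

lemma pvSetCell (g : List (List Int)) (a b : Nat) (v : Int)
    (ha : a < g.length) (hb : b < (g.getD a []).length) (i j : Nat) :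
    pvCellN (g.set a ((g.getD a []).set b v)) i j =
      if i = a ∧ j = b then v else pvCellN g i j := by
  have hrow : g.getD a [] = g[a] := List.getD_eq_getElem g [] ha
  unfold pvCellN
  simp only [List.getD_eq_getElem?_getD, List.getElem?_set]
  by_cases hia : a = i
  · subst hia
    simp only [if_pos ha]
    by_cases hjb : b = j
    · subst hjb
      rw [hrow] at hb
      simp [hb, List.getElem?_eq_getElem ha]
    · simp [List.getElem?_eq_getElem ha, hjb]
      exact fun h => absurd h.symm hjb
  · simp [hia, Ne.symm hia]

lemma pvWrite_cell (g : List (List Int)) (s : Int × Int) (v : Int)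
    (h : pvInB g s) (i j : Nat) :
    pvCellN (pvWrite g s v) i j =
      if i = pvNR g s ∧ j = pvNC g s then v else pvCellN g i j := by
  obtain ⟨h1, h2, h3, h4⟩ := h
  rw [pvWrite_eq_set g s v ⟨h1, h2, h3, h4⟩]
  exact pvSetCell g (pvNR g s) (pvNC g s) v (pvNorm_lt _ _ h1 h2) (pvNorm_lt _ _ h3 h4) i j

lemma pvNR_write (g : List (List Int)) (s : Int × Int) (v : Int) (h : pvInB g s) (t : Int × Int) :
    pvNR (pvWrite g s v) t = pvNR g t := by
  unfold pvNR; rw [pvWrite_length g s v h]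

lemma pvRowlen_write (g : List (List Int)) (s : Int × Int) (v : Int) (h : pvInB g s)
    (t : Int × Int) : pvRowlen (pvWrite g s v) t = pvRowlen g t := by
  unfold pvRowlen
  rw [pvNR_write g s v h t, pvWrite_row_length g s v h]

lemma pvNC_write (g : List (List Int)) (s : Int × Int) (v : Int) (h : pvInB g s) (t : Int × Int) :
    pvNC (pvWrite g s v) t = pvNC g t := by
  unfold pvNC; rw [pvRowlen_write g s v h t]

lemma pvInB_write (g : List (List Int)) (s : Int × Int) (v : Int) (h : pvInB g s) (t : Int × Int) :
    pvInB (pvWrite g s v) t ↔ pvInB g t := by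
  unfold pvInB
  rw [pvWrite_length g s v h, pvRowlen_write g s v h t]

lemma foldl_write_cells (c : Int) :
    ∀ (L : List (Int × Int)) (g : List (List Int)), (∀ s ∈ L, pvInB g s) →
    ((L.foldl (fun gacc s => pvWrite gacc s c) g).length = g.length) ∧
    (∀ k : Nat, ((L.foldl (fun gacc s => pvWrite gacc s c) g).getD k []).length
        = (g.getD k []).length) ∧
    (∀ i j : Nat, pvCellN (L.foldl (fun gacc s => pvWrite gacc s c) g) i j =
        if (∃ s ∈ L, i = pvNR g s ∧ j = pvNC g s) then c else pvCellN g i j) := by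
  intro L
  induction L with
  | nil => intro g _; refine ⟨rfl, fun _ => rfl, fun i j => by simp⟩
  | cons s L ih =>
    intro g hb
    have hs : pvInB g s := hb s (List.mem_cons_self)
    have hb' : ∀ t ∈ L, pvInB (pvWrite g s c) t := by
      intro t ht
      exact (pvInB_write g s c hs t).mpr (hb t (List.mem_cons_of_mem s ht))
    obtain ⟨l1, l2, l3⟩ := ih (pvWrite g s c) hb'
    simp only [List.foldl_cons]
    refine ⟨by rw [l1, pvWrite_length g s c hs], ?_, ?_⟩
    · intro k; rw [l2 k, pvWrite_row_length g s c hs]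
    · intro i j
      rw [l3 i j, pvWrite_cell g s c hs i j]
      have hLsame : (∃ t ∈ L, i = pvNR (pvWrite g s c) t ∧ j = pvNC (pvWrite g s c) t) ↔
          (∃ t ∈ L, i = pvNR g t ∧ j = pvNC g t) := by
        constructor
        · rintro ⟨t, ht, he1, he2⟩
          exact ⟨t, ht, by rw [← pvNR_write g s c hs t]; exact he1,
            by rw [← pvNC_write g s c hs t]; exact he2⟩
        · rintro ⟨t, ht, he1, he2⟩
          exact ⟨t, ht, by rw [pvNR_write g s c hs t]; exact he1,
            by rw [pvNC_write g s c hs t]; exact he2⟩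
      by_cases hL : ∃ t ∈ L, i = pvNR (pvWrite g s c) t ∧ j = pvNC (pvWrite g s c) t
      · obtain ⟨t, ht, he⟩ := hLsame.mp hL
        have hcons : ∃ t ∈ s :: L, i = pvNR g t ∧ j = pvNC g t :=
          ⟨t, List.mem_cons_of_mem s ht, he⟩
        simp only [if_pos hL, if_pos hcons]
      · simp only [if_neg hL]
        by_cases he : i = pvNR g s ∧ j = pvNC g s
        · rw [if_pos he, if_pos ⟨s, List.mem_cons_self, he⟩]
        · rw [if_neg he, if_neg ?_]
          intro ⟨t, htm, hte⟩
          rcases List.mem_cons.mp htm with h | h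
          · exact he (h ▸ hte)
          · exact hL (hLsame.mpr ⟨t, h, hte⟩)

lemma pvCellN_eq_getElem (g : List (List Int)) (k j : Nat) (hk : k < g.length)
    (hj : j < g[k].length) : g[k][j] = pvCellN g k j := by
  unfold pvCellN
  rw [List.getD_eq_getElem g [] hk, List.getD_eq_getElem _ _ hj]

lemma foldl_write_ext (c : Int) :
    ∀ (L1 L2 : List (Int × Int)) (g : List (List Int)),
    (∀ x, x ∈ L1 ↔ x ∈ L2) →
    (∀ s ∈ L1, pvInB g s) →
    L1.foldl (fun gacc s => pvWrite gacc s c) g = L2.foldl (fun gacc s => pvWrite gacc s c) g := by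
  intro L1 L2 g hmem hbnd
  have hbnd2 : ∀ s ∈ L2, pvInB g s := fun s hs => hbnd s ((hmem s).mpr hs)
  obtain ⟨a1, a2, a3⟩ := foldl_write_cells c L1 g hbnd
  obtain ⟨b1, b2, b3⟩ := foldl_write_cells c L2 g hbnd2
  apply List.ext_getElem (by rw [a1, b1])
  intro k h1 h2
  apply List.ext_getElem
  · have e1 := a2 k; have e2 := b2 k
    rw [List.getD_eq_getElem _ _ h1] at e1
    rw [List.getD_eq_getElem _ _ h2] at e2
    rw [e1, e2]
  · intro j hj1 hj2
    rw [pvCellN_eq_getElem _ _ _ h1 hj1, pvCellN_eq_getElem _ _ _ h2 hj2, a3, b3]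
    have heq : (∃ s ∈ L1, k = pvNR g s ∧ j = pvNC g s) ↔
        (∃ s ∈ L2, k = pvNR g s ∧ j = pvNC g s) := by
      constructor
      · rintro ⟨s, hs, he⟩; exact ⟨s, (hmem s).mp hs, he⟩
      · rintro ⟨s, hs, he⟩; exact ⟨s, (hmem s).mpr hs, he⟩
    by_cases h : ∃ s ∈ L1, k = pvNR g s ∧ j = pvNC g s
    · rw [if_pos h, if_pos (heq.mp h)]
    · rw [if_neg h, if_neg (fun hx => h (heq.mpr hx))]

-- ===== VERDICT (by name: the statement is the Claim_ definition above) =====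
theorem colorBorder_spec : Claim_equal_colorBorder := by
  intro grid r0 c0 color _ hpre
  obtain ⟨h1, h2, h5, h3, h4⟩ := hpre
  unfold Spec_colorBorder
  have hg0 : PySem.List.pyGetD grid 0 [] = grid.headD [] := by
    rw [PySem.List.pyGetD_zero]
    cases grid with
    | nil => rfl
    | cons h t => rfl
  set nr : Nat := pvNorm grid.length r0 with hnr
  have hrn : nr < grid.length := pvNorm_lt _ _ h1 h2
  have hrowD : grid.getD nr [] = grid[nr] := List.getD_eq_getElem grid [] hrn
  have hget1 : PySem.List.pyGet? grid r0 = some grid[nr] := pyGet?_eq_norm grid r0 h1 h2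
  rw [hrowD] at h3 h4
  set nc : Nat := pvNorm grid[nr].length c0 with hnc
  have hcn : nc < grid[nr].length := pvNorm_lt _ _ h3 h4
  have hget2 : PySem.List.pyGet? grid[nr] c0 = some grid[nr][nc] :=
    pyGet?_eq_norm grid[nr] c0 h3 h4
  set ccv := grid[nr][nc] with hccv
  by_cases hcc0 : ccv = 0
  · -- component color 0: both return the grid unchanged
    simp only [colorBorder, colorBorder_alt, hget1, Option.bind_some, hget2]
    rw [if_pos hcc0, if_pos hcc0]
  · -- main case
    set nI : Int := (grid.length : Int) with hnI
    set pI : Int := ((PySem.List.pyGetD grid 0 []).length : Int) with hpI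
    set F : Nat := grid.length * (PySem.List.pyGetD grid 0 []).length + 1 with hF
    have hplen : (PySem.List.pyGetD grid 0 []).length = (grid.headD []).length := by rw [hg0]
    -- fuel is sufficient
    have hfuel : (pvGoodList grid ccv nI pI).length + 1 ≤ F := by
      have := pvGoodList_length grid ccv nI pI
      have e1 : nI.toNat = grid.length := by omega
      have e2 : pI.toNat = (PySem.List.pyGetD grid 0 []).length := by omega
      rw [e1, e2] at this
      omega
    -- run the DFS lemma
    obtain ⟨a1, a2, a3, a4, a5, a6, a7⟩ := pvDfsA_main grid ccv nI pI F [] [] (r0, c0)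
      List.nodup_nil (fun x hx => absurd hx List.not_mem_nil) (by omega)
    set rA := pvDfsA grid ccv nI pI F ([], []) (r0, c0) with hrA
    -- run the saturation lemma
    obtain ⟨b1, b2, b3⟩ := pvSaturate_main grid ccv nI pI (r0, c0) F [(r0, c0)]
      (List.nodup_singleton _) (List.mem_singleton_self _)
      (fun x hx => Or.inl (List.mem_singleton.mp hx))
      (fun x hx => (List.mem_singleton.mp hx) ▸ pvReach.refl)
      (by simp only [List.length_singleton]; omega)
    set comp := pvSaturate grid ccv nI pI F [(r0, c0)] with hcomp
    -- the visited sets agree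
    have hsets : ∀ x, (x = (r0, c0) ∨ x ∈ rA.1) ↔ x ∈ comp := by
      intro x
      constructor
      · rintro (rfl | hx)
        · exact b1 _ (List.mem_singleton_self _)
        · have hreach : pvReach grid ccv nI pI (r0, c0) x :=
            a6 x hx List.not_mem_nil
          exact pvReach_min grid ccv nI pI (r0, c0) (fun y => y ∈ comp)
            (b1 _ (List.mem_singleton_self _)) (fun u t hu ht => b3 u hu t ht) x hreach
      · intro hx
        have hreach := b2 x hx
        exact pvReach_min grid ccv nI pI (r0, c0) (fun y => y = (r0, c0) ∨ y ∈ rA.1)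
          (Or.inl rfl)
          (by
            rintro u t (rfl | hu) ht
            · exact Or.inr (a4 t ht)
            · exact Or.inr (a5 u hu List.not_mem_nil t ht))
          x hreach
    -- the border lists agree as sets
    have hborders : ∀ x, x ∈ rA.2 ↔ x ∈ comp.filter (fun s => pvIsBorderB grid ccv nI pI s) := by
      intro x
      rw [List.mem_filter, a7 x, ← hsets x, ← border_pred_eq grid ccv nI pI hcc0 x]
      constructor
      · rintro (hx | ⟨hbx, (rfl | ⟨hx, _⟩)⟩)
        · exact absurd hx List.not_mem_nil
        · exact ⟨Or.inl rfl, hbx⟩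
        · exact ⟨Or.inr hx, hbx⟩
      · rintro ⟨(rfl | hx), hbx⟩
        · exact Or.inr ⟨hbx, Or.inl rfl⟩
        · exact Or.inr ⟨hbx, Or.inr ⟨hx, List.not_mem_nil⟩⟩
    -- bounds for the written cells: good cells and the start cell are Python-indexable
    have hgoodbound : ∀ s : Int × Int, pvGood grid ccv nI pI s = true → pvInB grid s := by
      intro s hsgood
      unfold pvGood at hsgood
      simp only [Bool.and_eq_true, decide_eq_true_eq, beq_iff_eq] at hsgood
      obtain ⟨⟨⟨⟨k1, k2⟩, k3⟩, k4⟩, _⟩ := hsgood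
      have hsl : pvNR grid s = s.1.toNat := by
        unfold pvNR pvNorm; rw [if_neg (by omega)]
      have hsl2 : s.1.toNat < grid.length := by omega
      have hrl : (grid.headD []).length ≤ pvRowlen grid s := by
        unfold pvRowlen
        rw [hsl]
        exact h5 (grid.getD s.1.toNat []) (by
          rw [List.getD_eq_getElem grid [] hsl2]; exact List.getElem_mem hsl2)
      refine ⟨by omega, by omega, by omega, by omega⟩
    have hstartB : pvInB grid (r0, c0) := by
      have : pvNR grid (r0, c0) = nr := rfl
      have hrls : pvRowlen grid (r0, c0) = grid[nr].length := by
        unfold pvRowlen; rw [this, hrowD]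
      exact ⟨h1, h2, by rw [hrls]; exact h3, by rw [hrls]; exact h4⟩
    have hbound : ∀ s ∈ rA.2, pvInB grid s := by
      intro s hsb
      rcases (a7 s).mp hsb with hx | ⟨_, (heq | ⟨hx, _⟩)⟩
      · exact absurd hx List.not_mem_nil
      · rw [heq]; exact hstartB
      · exact hgoodbound s (a3 s hx)
    -- reduce both ports and conclude
    have hwrites := foldl_write_ext color rA.2
      (comp.filter (fun s => pvIsBorderB grid ccv nI pI s)) grid hborders hbound
    have hA : colorBorder grid r0 c0 color =
        rA.2.foldl (fun gacc s => pvWrite gacc s color) grid := by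
      simp only [colorBorder, hget1, hget2, if_neg hcc0]
      rfl
    have hB : colorBorder_alt grid r0 c0 color =
        (comp.filter (fun s => pvIsBorderB grid ccv nI pI s)).foldl
          (fun gacc s => pvWrite gacc s color) grid := by
      simp only [colorBorder_alt, hget1, Option.bind_some, hget2, if_neg hcc0]
      rfl
    rw [hA, hB]
    exact hwrites
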